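-- pv_equiv track=rewrite | github.com/omnikingzeno/countdown_numbers_game | benchmarks/export_target_solutions.py | unique_subsets_of_draw
-- ===== SOURCE A (Python) =====
-- from itertools import combinations
--
-- def unique_subsets_of_draw(draw: tuple[int, ...]) -> list[tuple[int, ...]]:
--     seen: set[tuple[int, ...]] = set()
--     out: list[tuple[int, ...]] = []
--
--     for subset_size in range(1, len(draw) + 1):
--         for index_group in combinations(range(len(draw)), subset_size):
--             subset = tuple(draw[index] for index in index_group)
--             if subset in seen:
--                 continue
--             seen.add(subset)
--             out.append(subset)
--
--     return out
-- ===== SOURCE B (Python) =====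
-- def _exts(t, rest):
--     out = []
--     for j, x in enumerate(rest):
--         out.append((t + (x,), rest[j + 1:]))
--     return out
--
--
-- def unique_subsets_of_draw(draw):
--     seen = set()
--     out = []
--     level = _exts((), tuple(draw))
--     while level:
--         for t, _ in level:
--             if t not in seen:
--                 seen.add(t)
--                 out.append(t)
--         level = [p for (t, rest) in level for p in _exts(t, rest)]
--     return out
-- ===== Notes on version B (the rewrite author's own statement) =====
-- stated objective: alternative
-- what changed: Replaces the per-size itertools.combinations loops with an iterative level-by-level expansion of the subset lattice: each subset is stored with its remaining suffix and extended by one element per level, emitting the same lexicographic order with the same first-occurrence dedup.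
import Mathlib
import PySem

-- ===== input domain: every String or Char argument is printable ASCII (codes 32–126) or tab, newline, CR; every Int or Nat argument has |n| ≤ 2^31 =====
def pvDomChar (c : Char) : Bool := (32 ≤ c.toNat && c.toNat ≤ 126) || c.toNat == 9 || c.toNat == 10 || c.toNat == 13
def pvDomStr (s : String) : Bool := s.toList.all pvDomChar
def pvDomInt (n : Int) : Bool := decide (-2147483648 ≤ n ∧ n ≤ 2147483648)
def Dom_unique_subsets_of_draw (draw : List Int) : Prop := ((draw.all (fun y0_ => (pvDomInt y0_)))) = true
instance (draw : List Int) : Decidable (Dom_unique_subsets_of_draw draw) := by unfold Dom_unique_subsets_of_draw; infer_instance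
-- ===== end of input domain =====

-- B replaces per-size itertools.combinations with an iterative level-by-level expansion of the
-- subset lattice (each subset carries its remaining suffix); same output, alternative decomposition.

-- ===== PORT A =====
-- itertools.combinations(xs, k) in lexicographic order (hand port; exact)
def combs {α : Type} : Nat → List α → List (List α)
  | 0, _ => [[]]
  | _ + 1, [] => []
  | k + 1, x :: xs => ((combs k xs).map (fun c => x :: c)) ++ combs (k + 1) xs

def unique_subsets_of_draw (draw : List Int) : List (List Int) :=
  let n : Int := (draw.length : Int)
  let st :=
    (PySem.List.pyRange 1 (n + 1) 1).foldl (fun st k =>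
      (combs k.toNat (PySem.List.pyRange 0 n 1)).foldl (fun st ig =>
        let subset := ig.map (fun i => PySem.List.pyGetD draw i 0)
        if PySem.Set.contains st.1 subset then st
        else (PySem.Set.add st.1 subset, st.2 ++ [subset])) st)
      ((PySem.Set.empty : PySem.Set (List Int)), ([] : List (List Int)))
  st.2

-- ===== PORT B =====
-- all one-element extensions of tuple t by an element of rest, each paired with its remaining suffix
def exts (t : List Int) : List Int → List (List Int × List Int)
  | [] => []
  | x :: xs => (t ++ [x], xs) :: exts t xs

-- the while loop of B; fuel = len(draw) always suffices (level k+1 is empty once k = len(draw))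
def bloop : Nat → List (List Int × List Int) → PySem.Set (List Int) × List (List Int) → List (List Int)
  | _, [], st => st.2
  | 0, _ :: _, st => st.2
  | fuel + 1, p :: ps, st =>
    let level := p :: ps
    let st' := level.foldl (fun st q =>
      if PySem.Set.contains st.1 q.1 then st
      else (PySem.Set.add st.1 q.1, st.2 ++ [q.1])) st
    bloop fuel (level.flatMap (fun q => exts q.1 q.2)) st'

def unique_subsets_of_draw_alt (draw : List Int) : List (List Int) :=
  bloop draw.length (exts [] draw) ((PySem.Set.empty : PySem.Set (List Int)), [])

-- ===== PRECONDITION & SPEC =====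
def Spec_unique_subsets_of_draw (draw : List Int) (out : List (List Int)) : Prop := out = unique_subsets_of_draw_alt draw
instance (draw : List Int) (out : List (List Int)) : Decidable (Spec_unique_subsets_of_draw draw out) := by unfold Spec_unique_subsets_of_draw; infer_instance

-- ===== CLAIM (what is proved, stated in full; the proofs are below) =====
def Claim_equal_unique_subsets_of_draw : Prop := ∀ (draw : List Int), Dom_unique_subsets_of_draw draw → Spec_unique_subsets_of_draw draw (unique_subsets_of_draw draw)

-- ===== LEMMAS AND PROOFS =====

-- the shared dedup step (python: `if subset in seen: continue; seen.add; out.append`)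
def dstep (st : PySem.Set (List Int) × List (List Int)) (t : List Int) :
    PySem.Set (List Int) × List (List Int) :=
  if PySem.Set.contains st.1 t then st else (PySem.Set.add st.1 t, st.2 ++ [t])

def dfold (ts : List (List Int)) (st : PySem.Set (List Int) × List (List Int)) :
    PySem.Set (List Int) × List (List Int) :=
  ts.foldl dstep st

-- (combination prefixed by t, suffix of xs after its last chosen element), size k, lex order
def scomb (t : List Int) : List Int → Nat → List (List Int × List Int)
  | xs, 0 => [(t, xs)]
  | [], _ + 1 => []
  | x :: xs, k + 1 => scomb (t ++ [x]) xs k ++ scomb t xs (k + 1)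

theorem exts_eq_scomb (t : List Int) (xs : List Int) : exts t xs = scomb t xs 1 := by
  induction xs generalizing t with
  | nil => rfl
  | cons x xs ih => simp [exts, scomb, ih]

theorem flatMap_exts_scomb (xs : List Int) :
    ∀ (t : List Int) (k : Nat),
      (scomb t xs k).flatMap (fun q => exts q.1 q.2) = scomb t xs (k + 1) := by
  induction xs with
  | nil =>
    intro t k
    cases k with
    | zero => simp [scomb, exts]
    | succ k => simp [scomb]
  | cons x xs ih =>
    intro t k
    cases k with
    | zero => simpa [scomb] using (exts_eq_scomb t (x :: xs))
    | succ k => simp [scomb, List.flatMap_append, ih]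

theorem map_fst_scomb (xs : List Int) :
    ∀ (t : List Int) (k : Nat),
      (scomb t xs k).map Prod.fst = (combs k xs).map (fun c => t ++ c) := by
  induction xs with
  | nil =>
    intro t k
    cases k with
    | zero => simp [scomb, combs]
    | succ k => simp [scomb, combs]
  | cons x xs ih =>
    intro t k
    cases k with
    | zero => simp [scomb, combs]
    | succ k => simp [scomb, combs, ih, List.map_map, Function.comp]

theorem scomb_eq_nil_iff (xs : List Int) :
    ∀ (t : List Int) (k : Nat), scomb t xs k = [] ↔ xs.length < k := by
  induction xs with
  | nil =>
    intro t k
    cases k with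
    | zero => simp [scomb]
    | succ k => simp [scomb]
  | cons x xs ih =>
    intro t k
    cases k with
    | zero => simp [scomb]
    | succ k => simp [scomb, ih]; omega

theorem combs_map {α β : Type} (f : α → β) (xs : List α) :
    ∀ (k : Nat), combs k (xs.map f) = (combs k xs).map (List.map f) := by
  induction xs with
  | nil => intro k; cases k <;> simp [combs]
  | cons x xs ih =>
    intro k
    cases k with
    | zero => simp [combs]
    | succ k => simp [combs, ih, List.map_map, Function.comp]

theorem range_map_getD (xs : List Int) :
    (List.range xs.length).map (fun i => xs.getD i 0) = xs := by
  apply List.ext_getElem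
  · simp
  · intro i h1 h2
    simp_all [List.getD]

-- B's loop, started at level k+1 with enough fuel, performs the dedup fold of sizes k+1 … n
theorem bloop_eq_dfold (draw : List Int) :
    ∀ (fuel k : Nat) (st : PySem.Set (List Int) × List (List Int)),
      draw.length ≤ k + fuel →
      bloop fuel (scomb [] draw (k + 1)) st =
        (dfold (((List.range (draw.length - k)).map (fun j => combs (k + 1 + j) draw)).flatten) st).2 := by
  intro fuel
  induction fuel with
  | zero =>
    intro k st h
    have hnil : scomb [] draw (k + 1) = [] := by
      rw [scomb_eq_nil_iff]; omega
    rw [hnil]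
    have : draw.length - k = 0 := by omega
    simp [this, bloop, dfold]
  | succ fuel ih =>
    intro k st h
    by_cases hnil : scomb [] draw (k + 1) = []
    · rw [hnil]
      have hlt : draw.length < k + 1 := (scomb_eq_nil_iff draw [] (k + 1)).1 hnil
      have : draw.length - k = 0 := by omega
      simp [this, bloop, dfold]
    · obtain ⟨p, ps, hcons⟩ : ∃ p ps, scomb [] draw (k + 1) = p :: ps := by
        cases hx : scomb [] draw (k + 1) with
        | nil => exact absurd hx hnil
        | cons p ps => exact ⟨p, ps, rfl⟩
      have hlen : k + 1 ≤ draw.length := by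
        by_contra hc
        exact hnil ((scomb_eq_nil_iff draw [] (k + 1)).2 (by omega))
      rw [hcons, bloop]
      rw [← hcons]
      have hst' : (scomb [] draw (k + 1)).foldl (fun st q =>
          if PySem.Set.contains st.1 q.1 then st
          else (PySem.Set.add st.1 q.1, st.2 ++ [q.1])) st
          = dfold (combs (k + 1) draw) st := by
        have hmap : (scomb [] draw (k + 1)).map Prod.fst = combs (k + 1) draw := by
          simpa using map_fst_scomb draw [] (k + 1)
        calc (scomb [] draw (k + 1)).foldl (fun st q =>
              if PySem.Set.contains st.1 q.1 then st
              else (PySem.Set.add st.1 q.1, st.2 ++ [q.1])) st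
            = ((scomb [] draw (k + 1)).map Prod.fst).foldl dstep st := by
              rw [List.foldl_map]; rfl
          _ = dfold (combs (k + 1) draw) st := by rw [hmap]; rfl
      rw [flatMap_exts_scomb, hst']
      rw [ih (k + 1) _ (by omega)]
      have hrange : draw.length - k = (draw.length - (k + 1)) + 1 := by omega
      rw [hrange, List.range_succ_eq_map]
      simp only [List.map_cons, List.map_map, List.flatten_cons]
      have hfun : ((fun j => combs (k + 1 + j) draw) ∘ Nat.succ) = (fun j => combs (k + 1 + 1 + j) draw) := by
        funext j
        simp [Function.comp]
        congr 1
        omega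
      rw [hfun]
      simp [dfold, List.foldl_append]

theorem A_eq (draw : List Int) :
    unique_subsets_of_draw draw =
      (dfold (((List.range draw.length).map (fun j => combs (j + 1) draw)).flatten)
        ((PySem.Set.empty : PySem.Set (List Int)), [])).2 := by
  unfold unique_subsets_of_draw
  simp only []
  have hr1 : PySem.List.pyRange 1 ((draw.length : Int) + 1) 1
      = (List.range draw.length).map (fun (k : Nat) => 1 + (k : Int)) := by
    rw [PySem.List.pyRange_one]
    norm_num
  have hr0 : PySem.List.pyRange 0 (draw.length : Int) 1
      = (List.range draw.length).map (fun (k : Nat) => (k : Int)) :=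
    PySem.List.pyRange_zero_natCast draw.length
  have hcombs : ∀ k : Nat,
      (combs k (PySem.List.pyRange 0 (draw.length : Int) 1)).map
        (List.map (fun i => PySem.List.pyGetD draw i 0)) = combs k draw := by
    intro k
    rw [hr0, combs_map, List.map_map]
    have : (List.map (fun i => PySem.List.pyGetD draw i 0) ∘ List.map (fun (k : Nat) => (k : Int)))
        = List.map (fun i : Nat => draw.getD i 0) := by
      funext l
      simp [List.map_map, Function.comp]
    rw [this, ← combs_map]
    rw [range_map_getD]
  rw [hr1, List.foldl_map]
  congr 1
  have hbody : ∀ (st : PySem.Set (List Int) × List (List Int)) (k : Nat),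
      (combs (1 + (k : Int)).toNat (PySem.List.pyRange 0 (draw.length : Int) 1)).foldl
        (fun st ig =>
          let subset := ig.map (fun i => PySem.List.pyGetD draw i 0)
          if PySem.Set.contains st.1 subset then st
          else (PySem.Set.add st.1 subset, st.2 ++ [subset])) st
      = dfold (combs (k + 1) draw) st := by
    intro st k
    have ht : (1 + (k : Int)).toNat = k + 1 := by omega
    rw [ht]
    calc (combs (k + 1) (PySem.List.pyRange 0 (draw.length : Int) 1)).foldl
          (fun st ig =>
            let subset := ig.map (fun i => PySem.List.pyGetD draw i 0)
            if PySem.Set.contains st.1 subset then st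
            else (PySem.Set.add st.1 subset, st.2 ++ [subset])) st
        = ((combs (k + 1) (PySem.List.pyRange 0 (draw.length : Int) 1)).map
            (List.map (fun i => PySem.List.pyGetD draw i 0))).foldl dstep st := by
          rw [List.foldl_map]; rfl
      _ = dfold (combs (k + 1) draw) st := by rw [hcombs]; rfl
  rw [PySem.List.foldl_congr_mem _ _ (fun st (k : Nat) => dfold (combs (k + 1) draw) st) _
      (fun st k _ => hbody st k)]
  simp only [dfold, List.foldl_flatten, List.foldl_map]

theorem B_eq (draw : List Int) :
    unique_subsets_of_draw_alt draw =
      (dfold (((List.range draw.length).map (fun j => combs (j + 1) draw)).flatten)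
        ((PySem.Set.empty : PySem.Set (List Int)), [])).2 := by
  unfold unique_subsets_of_draw_alt
  rw [exts_eq_scomb]
  have := bloop_eq_dfold draw draw.length 0
    ((PySem.Set.empty : PySem.Set (List Int)), []) (by omega)
  simp only [Nat.zero_add, Nat.sub_zero] at this
  rw [this]
  have hmap : (List.range draw.length).map (fun j => combs (1 + j) draw)
      = (List.range draw.length).map (fun j => combs (j + 1) draw) :=
    List.map_congr_left (fun j _ => by rw [Nat.add_comm])
  rw [hmap]

-- ===== VERDICT (by name: the statement is the Claim_ definition above) =====
theorem unique_subsets_of_draw_spec : Claim_equal_unique_subsets_of_draw := by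
  intro draw _
  unfold Spec_unique_subsets_of_draw
  rw [A_eq, B_eq]
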